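-- pv_equiv track=rewrite | github.com/nverma1/merging-text-transformers | utils.py | find_pairs
-- ===== SOURCE A (Python) =====
-- def find_pairs(str_splits):
--     pairs = []
--     for i, str_split_i in enumerate(str_splits):
--         try:
--             split_i = set([int(k) for k in str_split_i.split('_')])
--         except:
--             continue
--         for str_split_j in str_splits[i+1:]:
--             try:
--                 split_j = set([int(k) for k in str_split_j.split('_')])
--             except:
--                 continue
--             if len(split_i.intersection(split_j)) == 0:
--                 pairs.append((str_split_i, str_split_j))
--     return pairs
-- ===== SOURCE B (Python) =====
-- def find_pairs(str_splits):
--     # One-pass parse + inverted index (value -> positions); pair (i, j) kept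
--     # iff j is not in the union of index buckets of i's values.
--     parsed = []
--     for s in str_splits:
--         try:
--             parsed.append(set(int(k) for k in s.split('_')))
--         except:
--             parsed.append(None)
--     index = {}
--     for i, si in enumerate(parsed):
--         if si is not None:
--             for v in si:
--                 index.setdefault(v, []).append(i)
--     pairs = []
--     for i, si in enumerate(parsed):
--         if si is None:
--             continue
--         conflicts = set()
--         for v in si:
--             conflicts.update(index[v])
--         for j in range(i + 1, len(parsed)):
--             if parsed[j] is not None and j not in conflicts:
--                 pairs.append((str_splits[i], str_splits[j]))
--     return pairs
-- ===== Notes on version B (the rewrite author's own statement) =====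
-- stated objective: alternative
-- what changed: B parses every string exactly once (A re-parses each j-string inside the quadratic inner loop), builds an inverted index from each integer value to the positions containing it, and emits a pair (i,j) iff j is absent from the union of i's index buckets, instead of intersecting the two sets of every pair.
import Mathlib
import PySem

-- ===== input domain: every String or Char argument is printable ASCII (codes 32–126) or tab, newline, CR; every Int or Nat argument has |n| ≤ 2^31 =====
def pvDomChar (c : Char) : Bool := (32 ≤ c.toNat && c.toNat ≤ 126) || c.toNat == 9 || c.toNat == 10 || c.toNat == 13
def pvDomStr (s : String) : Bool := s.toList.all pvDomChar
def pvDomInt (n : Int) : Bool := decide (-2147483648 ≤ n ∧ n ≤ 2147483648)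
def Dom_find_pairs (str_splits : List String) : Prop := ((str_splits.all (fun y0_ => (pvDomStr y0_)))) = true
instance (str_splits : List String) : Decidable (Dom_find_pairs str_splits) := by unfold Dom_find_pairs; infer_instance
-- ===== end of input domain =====

-- ===== PORT A =====
-- B (alternative): parses each string once and pairs positions through an inverted index
-- (value -> positions containing it) instead of re-parsing and intersecting every pair of sets.
-- shared helper: the comprehension 'set(int(k) for k in s.split('_'))' with its try/except
-- (identical source text in A and in B): none = some int() raised ValueError.
def pvParseInts : List (List Char) -> Option (List Int)
  | [] => some []
  | s :: rest =>
    match PySem.Int.ofChars? s with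
    | none => none
    | some v => (pvParseInts rest).map (v :: .)

def pvParse (s : String) : Option (PySem.Set Int) :=
  (pvParseInts (PySem.Chars.splitOn s.toList ['_'])).map PySem.Set.ofList

def find_pairs (str_splits : List String) : List (String × String) :=
  (PySem.List.enumerate str_splits).foldl (fun pairs p =>
    match pvParse p.2 with
    | none => pairs
    | some split_i =>
      (PySem.List.slice str_splits (some (p.1 + 1)) none).foldl (fun pairs s_j =>
        match pvParse s_j with
        | none => pairs
        | some split_j =>
          if PySem.Set.len (PySem.Set.inter split_i split_j) = 0 then
            pairs ++ [(p.2, s_j)]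
          else pairs) pairs) []

-- ===== PORT B =====
def find_pairs_alt (str_splits : List String) : List (String × String) :=
  let parsed := str_splits.map pvParse
  let index : PySem.Dict Int (List Int) :=
    (PySem.List.enumerate parsed).foldl (fun d p =>
      match p.2 with
      | none => d
      | some si => si.foldl (fun d v => PySem.Dict.modify d v [] (. ++ [p.1])) d)
      PySem.Dict.empty
  (PySem.List.enumerate parsed).foldl (fun pairs p =>
    match p.2 with
    | none => pairs
    | some si =>
      let conflicts : PySem.Set Int :=
        si.foldl (fun c v => PySem.Set.update c (PySem.Dict.getD index v [])) PySem.Set.empty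
      (PySem.List.pyRange (p.1 + 1) (parsed.length : Int) 1).foldl (fun pairs j =>
        if (PySem.List.pyGetD parsed j none).isSome && !(PySem.Set.contains conflicts j) then
          pairs ++ [(PySem.List.pyGetD str_splits p.1 "", PySem.List.pyGetD str_splits j "")]
        else pairs) pairs) []

-- ===== PRECONDITION & SPEC =====
def Spec_find_pairs (str_splits : List String) (out : List (String × String)) : Prop := out = find_pairs_alt str_splits
instance (str_splits : List String) (out : List (String × String)) : Decidable (Spec_find_pairs str_splits out) := by unfold Spec_find_pairs; infer_instance

-- ===== CLAIM (what is proved, stated in full; the proofs are below) =====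
def Claim_equal_find_pairs : Prop := ∀ (str_splits : List String), Dom_find_pairs str_splits → Spec_find_pairs str_splits (find_pairs str_splits)

-- ===== LEMMAS AND PROOFS =====

-- loop flattening: a fold over a flatMap is the nested fold
theorem pvFoldlFlatMap {a b g : Type} (l : List a) (gl : a -> List g) (f : b -> g -> b) (i : b) :
    (l.flatMap gl).foldl f i = l.foldl (fun acc x => (gl x).foldl f acc) i := by
  induction l generalizing i with
  | nil => rfl
  | cons x t ih => simp [List.foldl_append, ih]

-- pointwise congruence for flatMap
theorem pvFlatMapCongr {a b : Type} {l : List a} {f g : a -> List b}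
    (h : forall x, x ∈ l -> f x = g x) : l.flatMap f = l.flatMap g := by
  induction l with
  | nil => rfl
  | cons x t ih => simp only [List.flatMap_cons, h x (by simp), ih (fun y hy => h y (by simp [hy]))]

-- membership in a union-accumulating fold of Set.update
theorem pvMemFoldlUpdate {a b : Type} [BEq b] [LawfulBEq b] (l : List a) (f : a -> List b)
    (c : PySem.Set b) (y : b) :
    (y ∈ l.foldl (fun c v => PySem.Set.update c (f v)) c) ↔ y ∈ c ∨ ∃ v ∈ l, y ∈ f v := by
  induction l generalizing c with
  | nil => simp
  | cons x t ih =>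
    simp only [List.foldl_cons, ih, PySem.Set.mem_update, List.mem_cons]
    constructor
    · rintro ((h | h) | ⟨v, hv, hy⟩)
      · exact Or.inl h
      · exact Or.inr ⟨x, Or.inl rfl, h⟩
      · exact Or.inr ⟨v, Or.inr hv, hy⟩
    · rintro (h | ⟨v, (rfl | hv), hy⟩)
      · exact Or.inl (Or.inl h)
      · exact Or.inl (Or.inr hy)
      · exact Or.inr ⟨v, hv, hy⟩

-- enumerate of a mapped list
theorem pvEnumerateMap {a b : Type} (f : a -> b) (xs : List a) (s : Int) :
    PySem.List.enumerate (xs.map f) s = (PySem.List.enumerate xs s).map (fun p => (p.1, f p.2)) := by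
  induction xs generalizing s with
  | nil => rfl
  | cons x t ih => simp [PySem.List.enumerate_cons, ih]

-- the inverted index of B, as a standalone definition (proof helper; definitionally the
-- 'index' let-binding of find_pairs_alt)
def pvIdx (parsed : List (Option (PySem.Set Int))) : PySem.Dict Int (List Int) :=
  (PySem.List.enumerate parsed).foldl (fun d p =>
    match p.2 with
    | none => d
    | some si => si.foldl (fun d v => PySem.Dict.modify d v [] (. ++ [p.1])) d)
    PySem.Dict.empty

-- what the inverted index holds: j is in bucket v iff position j parses to a set containing v
theorem pvIdxMem (parsed : List (Option (PySem.Set Int))) (v j : Int) :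
    j ∈ PySem.Dict.getD (pvIdx parsed) v [] ↔
      ∃ (m : Nat), ∃ (_ : m < parsed.length), j = (m : Int) ∧
        ∃ s, parsed[m] = some s ∧ v ∈ s := by
  have hb : (PySem.List.enumerate parsed).foldl (fun d p =>
      match p.2 with
      | none => d
      | some si => si.foldl (fun d v => PySem.Dict.modify d v [] (. ++ [p.1])) d)
      PySem.Dict.empty
    = ((PySem.List.enumerate parsed).flatMap (fun p =>
        match p.2 with
        | none => []
        | some si => si.map (fun v => (v, p.1)))).foldl
        (fun d q => PySem.Dict.modify d q.1 [] (. ++ [q.2])) PySem.Dict.empty := by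
    rw [pvFoldlFlatMap]
    apply PySem.List.foldl_congr_mem
    intro d p _
    cases p.2 with
    | none => rfl
    | some si => rw [List.foldl_map]
  unfold pvIdx
  rw [hb, PySem.Dict.getD_foldl_modify_append, PySem.Dict.getD_empty]
  simp only [List.nil_append, List.mem_map, List.mem_filter, List.mem_flatMap,
    PySem.List.mem_enumerate_iff]
  constructor
  · rintro ⟨q, ⟨⟨p, ⟨⟨m, hm, rfl⟩, hq⟩⟩, hv⟩, rfl⟩
    cases hp2 : parsed[m] with
    | none => rw [hp2] at hq; simp at hq
    | some s =>
      rw [hp2] at hq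
      simp only [List.mem_map] at hq
      obtain ⟨w, hw, rfl⟩ := hq
      simp only [beq_iff_eq] at hv
      subst hv
      exact ⟨m, hm, by simp, s, hp2, hw⟩
  · rintro ⟨m, hm, rfl, s, hs, hv⟩
    refine ⟨(v, (m : Int)), ⟨⟨((m : Int), parsed[m]), ⟨m, hm, by simp⟩, ?_⟩, by simp⟩, rfl⟩
    rw [hs]
    simp only [List.mem_map]
    exact ⟨v, hv, rfl⟩

-- A in flatMap normal form
theorem pvAeq (xs : List String) : find_pairs xs =
    (PySem.List.enumerate xs).flatMap (fun p =>
      match pvParse p.2 with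
      | none => []
      | some si => (PySem.List.slice xs (some (p.1 + 1)) none).flatMap (fun t =>
          match pvParse t with
          | none => []
          | some sj =>
            if PySem.Set.len (PySem.Set.inter si sj) = 0 then [(p.2, t)] else [])) := by
  unfold find_pairs
  rw [PySem.List.foldl_congr_mem _ _
      (fun pairs p => pairs ++ (match pvParse p.2 with
        | none => []
        | some si => (PySem.List.slice xs (some (p.1 + 1)) none).flatMap (fun t =>
            match pvParse t with
            | none => []
            | some sj =>
              if PySem.Set.len (PySem.Set.inter si sj) = 0 then [(p.2, t)] else []))) _ ?_]
  · rw [PySem.List.foldl_append_eq_flatMap, List.nil_append]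
  · intro pairs p _
    cases hP : pvParse p.2 with
    | none => simp [hP]
    | some si =>
      simp only [hP]
      rw [PySem.List.foldl_congr_mem _ _
          (fun pairs t => pairs ++ (match pvParse t with
            | none => []
            | some sj =>
              if PySem.Set.len (PySem.Set.inter si sj) = 0 then [(p.2, t)] else [])) _ ?_]
      · rw [PySem.List.foldl_append_eq_flatMap]
      · intro pairs t _
        cases hQ : pvParse t with
        | none => simp [hQ]
        | some sj =>
          simp only [hQ]
          split <;> simp

-- B's outer loop body (proof helper; definitionally the body in find_pairs_alt)
def pvOuterB (xs : List String) (pairs : List (String × String))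
    (p : Int × Option (PySem.Set Int)) : List (String × String) :=
  match p.2 with
  | none => pairs
  | some si =>
    let conflicts : PySem.Set Int :=
      si.foldl (fun c v =>
        PySem.Set.update c (PySem.Dict.getD (pvIdx (xs.map pvParse)) v [])) PySem.Set.empty
    (PySem.List.pyRange (p.1 + 1) ((xs.map pvParse).length : Int) 1).foldl (fun pairs j =>
      if (PySem.List.pyGetD (xs.map pvParse) j none).isSome
          && !(PySem.Set.contains conflicts j) then
        pairs ++ [(PySem.List.pyGetD xs p.1 "", PySem.List.pyGetD xs j "")]
      else pairs) pairs

-- B in flatMap normal form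
theorem pvBeq (xs : List String) : find_pairs_alt xs =
    (PySem.List.enumerate (xs.map pvParse)).flatMap (fun p =>
      match p.2 with
      | none => []
      | some si =>
        (PySem.List.pyRange (p.1 + 1) ((xs.map pvParse).length : Int) 1).flatMap (fun j =>
          if (PySem.List.pyGetD (xs.map pvParse) j none).isSome
              && !(PySem.Set.contains
                    (si.foldl (fun c v =>
                      PySem.Set.update c (PySem.Dict.getD (pvIdx (xs.map pvParse)) v []))
                      PySem.Set.empty) j) then
            [(PySem.List.pyGetD xs p.1 "", PySem.List.pyGetD xs j "")]
          else [])) := by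
  have h0 : find_pairs_alt xs =
      (PySem.List.enumerate (xs.map pvParse)).foldl (pvOuterB xs) [] := rfl
  rw [h0]
  rw [PySem.List.foldl_congr_mem _ _
      (fun pairs p => pairs ++ (match p.2 with
        | none => []
        | some si =>
          (PySem.List.pyRange (p.1 + 1) ((xs.map pvParse).length : Int) 1).flatMap (fun j =>
            if (PySem.List.pyGetD (xs.map pvParse) j none).isSome
                && !(PySem.Set.contains
                      (si.foldl (fun c v =>
                        PySem.Set.update c (PySem.Dict.getD (pvIdx (xs.map pvParse)) v []))
                        PySem.Set.empty) j) then
              [(PySem.List.pyGetD xs p.1 "", PySem.List.pyGetD xs j "")]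
            else []))) _ ?_]
  · rw [PySem.List.foldl_append_eq_flatMap, List.nil_append]
  · intro pairs p _
    cases hP : p.2 with
    | none => simp [pvOuterB, hP]
    | some si =>
      simp only [pvOuterB, hP]
      rw [PySem.List.foldl_congr_mem _ _
          (fun pairs j => pairs ++ (if (PySem.List.pyGetD (xs.map pvParse) j none).isSome
                && !(PySem.Set.contains
                      (si.foldl (fun c v =>
                        PySem.Set.update c (PySem.Dict.getD (pvIdx (xs.map pvParse)) v []))
                        PySem.Set.empty) j) then
              [(PySem.List.pyGetD xs p.1 "", PySem.List.pyGetD xs j "")]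
            else [])) _ ?_]
      · rw [PySem.List.foldl_append_eq_flatMap]
      · intro pairs j _
        beta_reduce
        split <;> rename_i hc
        · rfl
        · rw [List.append_nil]

-- disjointness of two parsed sets, read off A's intersection test
theorem pvLenInterZero (si sj : PySem.Set Int) :
    PySem.Set.len (PySem.Set.inter si sj) = 0 ↔ ¬ ∃ v ∈ si, v ∈ sj := by
  unfold PySem.Set.len PySem.Set.inter
  rw [Int.natCast_eq_zero, List.length_eq_zero_iff, List.eq_nil_iff_forall_not_mem]
  constructor
  · rintro h ⟨v, hv, hvj⟩
    exact h v (List.mem_filter.mpr ⟨hv, (PySem.Set.contains_iff sj v).mpr hvj⟩)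
  · intro h v hv
    rcases List.mem_filter.mp hv with ⟨h1, h2⟩
    exact h ⟨v, h1, (PySem.Set.contains_iff sj v).mp h2⟩

theorem pvMain (xs : List String) : find_pairs xs = find_pairs_alt xs := by
  rw [pvAeq, pvBeq, pvEnumerateMap, List.flatMap_map]
  apply pvFlatMapCongr
  intro p hp
  rw [PySem.List.mem_enumerate_iff] at hp
  obtain ⟨k, hk, rfl⟩ := hp
  simp only [zero_add]
  cases hP : pvParse xs[k] with
  | none => simp
  | some si =>
    simp only []
    have hk0 : (0 : Int) ≤ (k : Int) + 1 := by positivity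
    rw [PySem.List.slice_from xs hk0]
    have hlen : ((xs.map pvParse).length : Int) = (xs.length : Int) := by
      simp
    rw [hlen, ← PySem.List.map_pyGetD_pyRange' xs "" hk0, List.flatMap_map]
    apply pvFlatMapCongr
    intro j hj
    rw [PySem.List.mem_pyRange_one] at hj
    obtain ⟨hj1, hj2⟩ := hj
    have hj0 : (0 : Int) ≤ j := by omega
    have hjn : j.toNat < xs.length := by omega
    rw [PySem.List.pyGetD_eq_getElem xs "" hj0 hj2]
    have hpg : PySem.List.pyGetD (xs.map pvParse) j none = pvParse xs[j.toNat] := by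
      rw [PySem.List.pyGetD_eq_getElem (xs.map pvParse) none hj0 (by simpa using hj2)]
      simp
    rw [hpg]
    cases hQ : pvParse xs[j.toNat] with
    | none => simp
    | some sj =>
      simp only [Option.isSome_some, Bool.true_and]
      have hkget : PySem.List.pyGetD xs ((k : Int)) "" = xs[k] := by
        rw [PySem.List.pyGetD_eq_getElem xs "" (by positivity) (by exact_mod_cast hk)]
        simp
      have hconfl : PySem.Set.contains
          (si.foldl (fun c v =>
            PySem.Set.update c (PySem.Dict.getD (pvIdx (xs.map pvParse)) v []))
            PySem.Set.empty) j = true ↔ ∃ v ∈ si, v ∈ sj := by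
        rw [PySem.Set.contains_iff, pvMemFoldlUpdate]
        constructor
        · rintro (h | ⟨v, hv, hmem⟩)
          · simp [PySem.Set.empty] at h
          · rw [pvIdxMem] at hmem
            obtain ⟨m, hm, hjm, s, hs, hvs⟩ := hmem
            have hmj : m = j.toNat := by omega
            subst hmj
            rw [List.getElem_map] at hs
            rw [hQ] at hs
            cases hs
            exact ⟨v, hv, hvs⟩
        · rintro ⟨v, hv, hvj⟩
          refine Or.inr ⟨v, hv, ?_⟩
          rw [pvIdxMem]
          exact ⟨j.toNat, by simpa using hjn, by omega,
            sj, by rw [List.getElem_map, hQ], hvj⟩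
      by_cases hD : ∃ v ∈ si, v ∈ sj
      · have hcj := hconfl.mpr hD
        rw [if_neg (by rw [pvLenInterZero]; exact fun h => h hD),
          if_neg (by rw [hcj]; decide)]
      · have hcj : (si.foldl (fun c v =>
            PySem.Set.update c (PySem.Dict.getD (pvIdx (xs.map pvParse)) v []))
            PySem.Set.empty).contains j = false := by
          rw [← Bool.not_eq_true]
          exact fun h => hD (hconfl.mp h)
        rw [if_pos (pvLenInterZero si sj |>.mpr hD), hkget,
          if_pos (by rw [hcj]; decide)]

-- ===== VERDICT (by name: the statement is the Claim_ definition above) =====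
theorem find_pairs_spec : Claim_equal_find_pairs := by
  intro xs _
  unfold Spec_find_pairs
  exact pvMain xs
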